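-- pv_equiv track=rewrite | github.com/hahahatt/study-room4 | backend/email/pii_masker.py | merge_entities
-- ===== SOURCE A (Python) =====
-- def merge_entities(tagged):
--     result = []
--     tag = None
--     buffer = ""
--     for char, label in tagged:
--         if label.startswith("B-"):
--             if tag:
--                 result.append((buffer, tag))
--             tag = label[2:]
--             buffer = char
--         elif label.startswith("I-") and tag == label[2:]:
--             buffer += char
--         else:
--             if tag:
--                 result.append((buffer, tag))
--             tag, buffer = None, ""
--     if tag:
--         result.append((buffer, tag))
--     return result
-- ===== SOURCE B (Python) =====
-- def merge_entities(tagged):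
--     result = []
--     n = len(tagged)
--     i = 0
--     while i < n:
--         char, label = tagged[i]
--         if label.startswith("B-"):
--             tag = label[2:]
--             buffer = char
--             i += 1
--             while i < n and tagged[i][1] == "I-" + tag:
--                 buffer += tagged[i][0]
--                 i += 1
--             if tag:
--                 result.append((buffer, tag))
--         else:
--             i += 1
--     return result
-- ===== Notes on version B (the rewrite author's own statement) =====
-- stated objective: alternative
-- what changed: Replaced A's flat per-token state machine (carried tag/buffer state with emits on every state break and a trailing flush) by a two-level traversal: an outer index scan that starts a span only at 'B-' tokens and an inner while-loop that greedily extends it over matching 'I-' tokens, emitting each span where its run ends.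
import Mathlib
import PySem

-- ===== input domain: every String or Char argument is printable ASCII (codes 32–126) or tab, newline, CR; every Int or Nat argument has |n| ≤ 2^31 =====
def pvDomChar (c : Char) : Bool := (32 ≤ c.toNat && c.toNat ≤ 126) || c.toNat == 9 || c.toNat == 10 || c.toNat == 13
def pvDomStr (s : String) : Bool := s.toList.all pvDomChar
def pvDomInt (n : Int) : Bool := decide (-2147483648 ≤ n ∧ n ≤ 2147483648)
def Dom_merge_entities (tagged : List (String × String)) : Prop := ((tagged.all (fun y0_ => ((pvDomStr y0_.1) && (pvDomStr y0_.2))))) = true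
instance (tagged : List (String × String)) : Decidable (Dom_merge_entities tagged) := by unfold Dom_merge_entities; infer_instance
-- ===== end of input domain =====

-- B replaces A's flat per-token state machine by an outer scan that starts a span at each
-- "B-" token and an inner loop that extends it over matching "I-" tokens (objective: alternative decomposition).

-- ===== PORT A =====
-- 'if tag: result.append((buffer, tag))' with tag : Option String (None → none)
def pyEmitA (tag : Option String) (buffer : String) : List (String × String) :=
  match tag with
  | none => []
  | some t => if t == "" then [] else [(buffer, t)]

def mergeStepA (st : List (String × String) × Option String × String) (cl : String × String) :
    List (String × String) × Option String × String :=
  match st, cl with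
  | (result, tag, buffer), (char, label) =>
    if PySem.Str.startswith label "B-" then
      (result ++ pyEmitA tag buffer, some (PySem.Str.slice label (some 2) none), char)
    else if PySem.Str.startswith label "I-" && (tag == some (PySem.Str.slice label (some 2) none)) then
      (result, tag, buffer ++ char)
    else
      (result ++ pyEmitA tag buffer, none, "")

def merge_entities (tagged : List (String × String)) : List (String × String) :=
  match tagged.foldl mergeStepA ([], none, "") with
  | (result, tag, buffer) => result ++ pyEmitA tag buffer

-- ===== PORT B =====
-- inner while loop: extend the current span over tokens labelled "I-" + tag
def extendRunB (tag buffer : String) : List (String × String) → String × List (String × String)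
  | [] => (buffer, [])
  | (char, label) :: rest =>
    if label == "I-" ++ tag then extendRunB tag (buffer ++ char) rest
    else (buffer, (char, label) :: rest)

theorem extendRunB_snd_length_le (tag buffer : String) (l : List (String × String)) :
    (extendRunB tag buffer l).2.length ≤ l.length := by
  induction l generalizing buffer with
  | nil => simp [extendRunB]
  | cons hd tl ih =>
    obtain ⟨c, lab⟩ := hd
    by_cases h : lab = "I-" ++ tag
    · simpa [extendRunB, h] using Nat.le_succ_of_le (ih _)
    · simp [extendRunB, h]

-- outer while loop over the index i, here structural recursion on the remaining suffix
def merge_entities_alt : List (String × String) → List (String × String)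
  | [] => []
  | (char, label) :: rest =>
    if PySem.Str.startswith label "B-" then
      let tag := PySem.Str.slice label (some 2) none
      let br := extendRunB tag char rest
      (if tag == "" then [] else [(br.1, tag)]) ++ merge_entities_alt br.2
    else merge_entities_alt rest
  termination_by l => l.length
  decreasing_by
    · exact Nat.lt_succ_of_le (extendRunB_snd_length_le _ _ _)
    · simp

-- ===== PRECONDITION & SPEC =====
def Spec_merge_entities (tagged : List (String × String)) (out : List (String × String)) : Prop := out = merge_entities_alt tagged
instance (tagged : List (String × String)) (out : List (String × String)) : Decidable (Spec_merge_entities tagged out) := by unfold Spec_merge_entities; infer_instance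

-- ===== CLAIM (what is proved, stated in full; the proofs are below) =====
def Claim_equal_merge_entities : Prop := ∀ (tagged : List (String × String)), Dom_merge_entities tagged → Spec_merge_entities tagged (merge_entities tagged)

-- ===== LEMMAS AND PROOFS =====

-- A's pair of tests "label.startswith('I-') and tag == label[2:]" is exactly B's "label == 'I-' + tag"
theorem iTest_iff (lab t : String) :
    (PySem.Str.startswith lab "I-" = true ∧ t = PySem.Str.slice lab (some 2) none) ↔ lab = "I-" ++ t := by
  have hslice : (PySem.Str.slice lab (some 2) none).toList = lab.toList.drop 2 := by
    have h2 := PySem.List.slice_from_natCast (xs := lab.toList) (a := 2)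
    simp [PySem.Str.toList_slice]
    simpa using h2
  constructor
  · rintro ⟨h1, h2⟩
    obtain ⟨rest, hrest⟩ : ("I-" : String).toList <+: lab.toList := by
      simpa [PySem.Chars.startswith_iff] using h1
    have hlab : lab.toList = 'I' :: '-' :: rest := by
      rw [← hrest, show ("I-" : String).toList = ['I', '-'] from rfl]; rfl
    apply String.toList_inj.mp
    rw [String.toList_append, hlab, show ("I-" : String).toList = ['I', '-'] from rfl]
    have : t.toList = rest := by rw [h2, hslice, hlab]; rfl
    simp [this]
  · rintro rfl
    constructor
    · simp [PySem.Chars.startswith_iff, String.toList_append,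
        show ("I-" : String).toList = ['I', '-'] from rfl]
    · apply String.toList_inj.mp
      rw [hslice, String.toList_append, show ("I-" : String).toList = ['I', '-'] from rfl]
      rfl

theorem startswith_B_of_I (t : String) : PySem.Str.startswith ("I-" ++ t) "B-" = false := by
  rw [Bool.eq_false_iff]
  intro h
  simp [PySem.Chars.startswith_iff] at h

def runA (l : List (String × String)) (st : List (String × String) × Option String × String) :
    List (String × String) :=
  match l.foldl mergeStepA st with
  | (result, tag, buffer) => result ++ pyEmitA tag buffer

theorem runA_invariant (l : List (String × String)) :
    (∀ res, runA l (res, none, "") = res ++ merge_entities_alt l) ∧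
    (∀ t buf res, runA l (res, some t, buf) =
      res ++ (if t == "" then [] else [((extendRunB t buf l).1, t)]) ++
        merge_entities_alt (extendRunB t buf l).2) := by
  induction l with
  | nil =>
    constructor
    · intro res; simp [runA, pyEmitA, merge_entities_alt]
    · intro t buf res; simp [runA, extendRunB, merge_entities_alt, pyEmitA]
  | cons hd tl ih =>
    obtain ⟨c, lab⟩ := hd
    have hstep : ∀ st, runA ((c, lab) :: tl) st = runA tl (mergeStepA st (c, lab)) := fun _ => rfl
    constructor
    · intro res
      rw [hstep]
      by_cases hB : PySem.Chars.startswith lab.toList ['B', '-'] = true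
      · rw [show mergeStepA (res, none, "") (c, lab)
              = (res, some (PySem.Str.slice lab (some 2) none), c) by
            simp [mergeStepA, hB, pyEmitA]]
        rw [ih.2]
        simp [merge_entities_alt, hB]
      · rw [show mergeStepA (res, none, "") (c, lab) = (res, none, "") by
            simp [mergeStepA, hB, pyEmitA]]
        rw [ih.1]
        simp [merge_entities_alt, hB]
    · intro t buf res
      rw [hstep]
      by_cases hI : lab = "I-" ++ t
      · subst hI
        obtain ⟨h1, h2⟩ := (iTest_iff ("I-" ++ t) t).mpr rfl
        have h1' : PySem.Chars.startswith ('I' :: '-' :: t.toList) ['I', '-'] = true := by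
          simpa using h1
        have hB' : PySem.Chars.startswith ('I' :: '-' :: t.toList) ['B', '-'] = false := by
          simpa using startswith_B_of_I t
        rw [show mergeStepA (res, some t, buf) (c, "I-" ++ t)
              = (res, some t, buf ++ c) by
            simp [mergeStepA, hB', h1', ← h2]]
        rw [ih.2]
        rw [show extendRunB t buf ((c, "I-" ++ t) :: tl) = extendRunB t (buf ++ c) tl by
            simp [extendRunB]]
      · have hext : extendRunB t buf ((c, lab) :: tl) = (buf, (c, lab) :: tl) := by
          simp [extendRunB, hI]
        have hcond : ¬ (PySem.Chars.startswith lab.toList ['I', '-'] = true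
            ∧ t = PySem.Str.slice lab (some 2) none) := by
          rintro ⟨ha, hb⟩
          exact hI ((iTest_iff lab t).mp ⟨by simpa using ha, hb⟩)
        by_cases hB : PySem.Chars.startswith lab.toList ['B', '-'] = true
        · rw [show mergeStepA (res, some t, buf) (c, lab)
                = (res ++ pyEmitA (some t) buf, some (PySem.Str.slice lab (some 2) none), c) by
              simp [mergeStepA, hB]]
          rw [ih.2]
          rw [hext]
          simp [merge_entities_alt, hB, pyEmitA]
        · rw [show mergeStepA (res, some t, buf) (c, lab)
                = (res ++ pyEmitA (some t) buf, none, "") by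
              simp [mergeStepA, hB, hcond]]
          rw [ih.1]
          rw [hext]
          simp [merge_entities_alt, hB, pyEmitA]

-- ===== VERDICT (by name: the statement is the Claim_ definition above) =====
theorem merge_entities_spec : Claim_equal_merge_entities := by
  intro tagged _
  show merge_entities tagged = merge_entities_alt tagged
  have h := (runA_invariant tagged).1 []
  simpa [runA, merge_entities] using h
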